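-- pv_equiv track=rewrite | github.com/MAGLeb/current_practice | kick_start/3_h_index.py | get_h_index
-- ===== SOURCE A (Python) =====
-- from typing import List
--
-- def get_h_index(c: List[int]):
--     result = [0]
--     d = {0: 1}
--
--     for i in range(len(c)):
--         number = c[i]
--
--         if number in d:
--             d[number] += 1
--         else:
--             d[number] = 1
--
--         counter = 0
--         last_elem = result[-1]
--         for key in sorted(d):
--             if key in d and key > last_elem:
--                 counter += d[key]
--
--         if counter > last_elem:
--             result.append(counter)
--             if last_elem in d:
--                 del d[last_elem]
--         else:
--             result.append(last_elem)
--
--     return result[1:]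
-- ===== SOURCE B (Python) =====
-- from typing import List
--
-- def get_h_index(c: List[int]):
--     # One pass: h = current h-index, size = number of seen citations > h,
--     # cnt[v] = multiplicity of seen citation value v for v > h.
--     result = []
--     h = 0
--     size = 0
--     cnt = {}
--     for x in c:
--         if x > h:
--             size += 1
--             cnt[x] = cnt.get(x, 0) + 1
--         if size > h:
--             h += 1
--             size -= cnt.pop(h, 0)
--         result.append(h)
--     return result
-- ===== Notes on version B (the rewrite author's own statement) =====
-- stated objective: faster
-- what changed: Replaces the per-step rescan that sorts the whole citation-count dict and re-sums counts above the current h with a single streaming pass that keeps h, the number of seen citations exceeding h, and a counter dict from which entries are evicted exactly once when h passes their value.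
import Mathlib
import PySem

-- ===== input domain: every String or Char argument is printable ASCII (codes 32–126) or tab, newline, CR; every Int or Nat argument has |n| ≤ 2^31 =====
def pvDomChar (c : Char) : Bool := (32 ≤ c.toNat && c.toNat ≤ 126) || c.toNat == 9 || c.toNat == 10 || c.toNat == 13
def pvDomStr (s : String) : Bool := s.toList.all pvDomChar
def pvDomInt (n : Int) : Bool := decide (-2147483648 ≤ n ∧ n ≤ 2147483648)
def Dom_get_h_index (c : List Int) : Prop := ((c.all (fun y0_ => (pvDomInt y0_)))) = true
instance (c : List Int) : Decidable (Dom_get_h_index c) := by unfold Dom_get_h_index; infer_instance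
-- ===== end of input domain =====

-- B replaces A's per-step sort-and-rescan of the citation-count dict by a one-pass
-- streaming update of (h, #citations > h, count dict with one-shot eviction); objective: faster.


-- ===== PORT A =====
-- the body of A's `for i in range(len(c))` loop, acting on the state (result, d)
def aStep (st : List Int × PySem.Dict Int Int) (number : Int) : List Int × PySem.Dict Int Int :=
  let result := st.1
  let d := if st.2.contains number
           then st.2.insert number (st.2.getD number 0 + 1)   -- d[number] += 1
           else st.2.insert number 1                           -- d[number] = 1
  let last_elem := (PySem.List.pyGet? result (-1)).getD 0      -- result[-1]; result is never empty, so exact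
  let counter := (PySem.List.sorted d.keys (fun k => k)).foldl
      (fun counter key => if d.contains key && decide (key > last_elem)
                          then counter + d.getD key 0 else counter) 0
  if counter > last_elem then
    (result ++ [counter], if d.contains last_elem then d.erase last_elem else d)
  else
    (result ++ [last_elem], d)

def get_h_index (c : List Int) : List Int :=
  let st := (PySem.List.pyRange 0 (PySem.List.len c)).foldl
      (fun st i => aStep st (PySem.List.pyGetD c i 0))         -- number = c[i], i always in range
      ([0], PySem.Dict.ofList [(0, 1)])
  PySem.List.slice st.1 (some 1) none                          -- result[1:]

-- ===== PORT B =====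
-- the body of B's `for x in c` loop, acting on the state (result, h, size, cnt)
def bStep (st : List Int × Int × Int × PySem.Dict Int Int) (x : Int) :
    List Int × Int × Int × PySem.Dict Int Int :=
  let res := st.1
  let h := st.2.1
  let p := if x > h then (st.2.2.1 + 1, st.2.2.2.insert x (st.2.2.2.getD x 0 + 1))
           else (st.2.2.1, st.2.2.2)                           -- size += 1; cnt[x] = cnt.get(x, 0) + 1
  if p.1 > h then
    -- h += 1; size -= cnt.pop(h, 0)
    (res ++ [h + 1], h + 1, p.1 - p.2.getD (h + 1) 0, p.2.erase (h + 1))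
  else
    (res ++ [h], h, p.1, p.2)

def get_h_index_alt (c : List Int) : List Int :=
  (c.foldl bStep ([], 0, 0, PySem.Dict.empty)).1

-- ===== PRECONDITION & SPEC =====
def Spec_get_h_index (c : List Int) (out : List Int) : Prop := out = get_h_index_alt c
instance (c : List Int) (out : List Int) : Decidable (Spec_get_h_index c out) := by unfold Spec_get_h_index; infer_instance

-- ===== CLAIM (what is proved, stated in full; the proofs are below) =====
def Claim_equal_get_h_index : Prop := ∀ (c : List Int), Dom_get_h_index c → Spec_get_h_index c (get_h_index c)

-- ===== LEMMAS AND PROOFS =====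

-- dict.erase facts (PySem.Dict.erase filters the item list)
theorem get?_erase_of_ne {ν : Type} (d : PySem.Dict Int ν) (k k' : Int) (h : k' ≠ k) :
    (d.erase k).get? k' = d.get? k' := by
  simp only [PySem.Dict.erase, PySem.Dict.get?, List.find?_filter]
  congr 2
  funext a
  by_cases hak' : a.1 = k'
  · have hak : a.1 ≠ k := by rw [hak']; exact h
    simp [hak', hak, h]
  · simp [hak']

theorem get?_erase_self {ν : Type} (d : PySem.Dict Int ν) (k : Int) :
    (d.erase k).get? k = none := by
  simp only [PySem.Dict.erase, PySem.Dict.get?, List.find?_filter]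
  have : (List.find? (fun a => decide ((!a.1 == k) = true ∧ (a.1 == k) = true)) d.items) = none := by
    apply List.find?_eq_none.mpr
    intro a _
    by_cases hak : a.1 = k <;> simp [hak]
  rw [this]; rfl

theorem keys_erase {ν : Type} (d : PySem.Dict Int ν) (k : Int) :
    (d.erase k).keys = d.keys.filter (fun a => !(a == k)) := by
  simp only [PySem.Dict.erase, PySem.Dict.keys, List.filter_map]
  rfl

theorem nodup_keys_erase {ν : Type} (d : PySem.Dict Int ν) (k : Int) (h : d.keys.Nodup) :
    (d.erase k).keys.Nodup := by
  rw [keys_erase]; exact List.Nodup.sublist List.filter_sublist h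

-- result[-1] of a nonempty list
theorem pyGet_neg_one {α : Type} (l : List α) (h : l ≠ []) :
    PySem.List.pyGet? l (-1) = l.getLast? := by
  have hl : 0 < l.length := List.length_pos_iff.mpr h
  simp only [PySem.List.pyGet?, PySem.List.pyIdx?]
  rw [List.getLast?_eq_getElem?]
  have h1 : ¬ (0:Int) ≤ -1 := by norm_num
  have h2 : -(l.length:Int) ≤ -1 := by omega
  simp [h1, h2]

-- total value mass of a dict
def sumVals (d : PySem.Dict Int Int) : Int := (d.keys.map (fun k => d.getD k 0)).sum

-- sum of f over a nodup list when f bumps g by one at a single present element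
theorem sum_map_update (l : List Int) (f g : Int → Int) (x : Int) (hx : x ∈ l) (hnd : l.Nodup)
    (hfx : f x = g x + 1) (hother : ∀ k ∈ l, k ≠ x → f k = g k) :
    (l.map f).sum = (l.map g).sum + 1 := by
  induction l with
  | nil => cases hx
  | cons a t ih =>
      have hnd' := List.nodup_cons.mp hnd
      by_cases hax : a = x
      · subst hax
        have hnt : a ∉ t := hnd'.1
        have hmap : t.map f = t.map g :=
          List.map_congr_left (fun k hk =>
            hother k (List.mem_cons_of_mem _ hk) (fun he => hnt (he ▸ hk)))
        simp only [List.map_cons, List.sum_cons, hmap, hfx]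
        ring
      · have hxt : x ∈ t := by
          rcases List.mem_cons.mp hx with h' | h'
          · exact absurd h'.symm hax
          · exact h'
        have ht := ih hxt hnd'.2 (fun k hk hne => hother k (List.mem_cons_of_mem _ hk) hne)
        have ha' := hother a List.mem_cons_self hax
        simp only [List.map_cons, List.sum_cons, ht, ha']
        ring

-- splitting the sum of f over a nodup list at a present element
theorem sum_map_filter_ne (l : List Int) (f : Int → Int) (x : Int) (hnd : l.Nodup) (hx : x ∈ l) :
    (l.map f).sum = ((l.filter (fun a => !(a == x))).map f).sum + f x := by
  induction l with
  | nil => cases hx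
  | cons a t ih =>
      have hnd' := List.nodup_cons.mp hnd
      by_cases hax : a = x
      · subst hax
        have hnt : a ∉ t := hnd'.1
        have hft : t.filter (fun b => !(b == a)) = t :=
          List.filter_eq_self.mpr (fun b hb => by
            have hba : b ≠ a := fun he => hnt (he ▸ hb)
            simp [hba])
        have hfa : List.filter (fun b => !(b == a)) (a :: t) = t := by
          rw [List.filter_cons]; simp [hft]
        rw [hfa]
        simp only [List.map_cons, List.sum_cons]
        ring
      · have hxt : x ∈ t := by
          rcases List.mem_cons.mp hx with h' | h'
          · exact absurd h'.symm hax
          · exact h'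
        have ht := ih hnd'.2 hxt
        simp only [List.filter_cons]
        have hcond : (!(a == x)) = true := by simp [hax]
        rw [hcond]
        simp only [if_true, List.map_cons, List.sum_cons, ht]
        ring

-- an if-guarded accumulating loop is a sum over the filtered list
theorem foldl_if_sum (l : List Int) (p : Int → Bool) (v : Int → Int) :
    l.foldl (fun c k => if p k then c + v k else c) 0 = ((l.filter p).map v).sum := by
  have h1 : ∀ (a : Int), l.foldl (fun c k => if p k then c + v k else c) a
      = a + ((l.filter p).map v).sum := by
    induction l with
    | nil => intro a; simp
    | cons b t ih =>
        intro a
        by_cases hb : p b <;> simp [List.foldl_cons, List.filter_cons, hb, ih] <;> ring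
  simpa using h1 0

theorem sumVals_insert_succ (d : PySem.Dict Int Int) (x : Int) (hnd : d.keys.Nodup) :
    sumVals (d.insert x (d.getD x 0 + 1)) = sumVals d + 1 := by
  unfold sumVals
  cases hc : d.contains x with
  | true =>
      rw [PySem.Dict.keys_insert_of_contains d _ hc]
      apply sum_map_update _ _ _ x ((PySem.Dict.contains_iff_mem_keys d x).mp hc) hnd
      · rw [PySem.Dict.getD_insert]; simp
      · intro k _ hk; rw [PySem.Dict.getD_insert]; simp [hk]
  | false =>
      rw [PySem.Dict.keys_insert_of_not_contains d _ hc]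
      have hnx : x ∉ d.keys := fun hm =>
        by rw [(PySem.Dict.contains_iff_mem_keys d x).mpr hm] at hc; cases hc
      have hmap : d.keys.map (fun k => (d.insert x (d.getD x 0 + 1)).getD k 0)
          = d.keys.map (fun k => d.getD k 0) := by
        apply List.map_congr_left
        intro k hk
        rw [PySem.Dict.getD_insert]
        have hkx : k ≠ x := fun he => hnx (he ▸ hk)
        simp [hkx]
      simp only [List.map_append, List.sum_append, hmap, List.map_cons, List.map_nil]
      rw [PySem.Dict.getD_insert]
      simp [PySem.Dict.getD_of_not_contains d 0 hc]

theorem sumVals_erase (d : PySem.Dict Int Int) (k : Int) (hnd : d.keys.Nodup) :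
    sumVals (d.erase k) = sumVals d - d.getD k 0 := by
  unfold sumVals
  rw [keys_erase]
  have hmap : (d.keys.filter (fun a => !(a == k))).map (fun k' => (d.erase k).getD k' 0)
      = (d.keys.filter (fun a => !(a == k))).map (fun k' => d.getD k' 0) := by
    apply List.map_congr_left
    intro k' hk'
    have hne : k' ≠ k := by simpa using (List.mem_filter.mp hk').2
    rw [PySem.Dict.getD_eq_get?_getD, PySem.Dict.getD_eq_get?_getD, get?_erase_of_ne d k k' hne]
  rw [hmap]
  by_cases hm : k ∈ d.keys
  · have := sum_map_filter_ne d.keys (fun k' => d.getD k' 0) k hnd hm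
    simp only [this]
    ring
  · have hfe : d.keys.filter (fun a => !(a == k)) = d.keys :=
      List.filter_eq_self.mpr (fun b hb => by simp; exact fun he => hm (he ▸ hb))
    have hc : d.contains k = false := by
      cases hcc : d.contains k
      · rfl
      · exact absurd ((PySem.Dict.contains_iff_mem_keys d k).mp hcc) hm
    rw [hfe, PySem.Dict.getD_of_not_contains d 0 hc]
    ring

-- A's inner loop over sorted(d) equals the value mass of cnt, given the state link
theorem counter_eq (d cnt : PySem.Dict Int Int) (h : Int)
    (hdk : d.keys.Nodup) (hck : cnt.keys.Nodup)
    (hagree : ∀ k, h < k → d.get? k = cnt.get? k)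
    (hlow : ∀ k ∈ cnt.keys, h < k) :
    (PySem.List.sorted d.keys (fun k => k)).foldl
      (fun counter key => if d.contains key && decide (key > h)
                          then counter + d.getD key 0 else counter) 0 = sumVals cnt := by
  rw [foldl_if_sum (PySem.List.sorted d.keys (fun k => k))
        (fun key => d.contains key && decide (key > h)) (fun key => d.getD key 0)]
  have hperm := PySem.List.sorted_perm d.keys (fun k => k) false
  rw [((hperm.filter (fun key => d.contains key && decide (key > h))).map
        (fun k => d.getD k 0)).sum_eq]
  have hfc : List.filter (fun key => d.contains key && decide (key > h)) d.keys
      = List.filter (fun key => decide (h < key)) d.keys :=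
    List.filter_congr (fun k hk => by
      rw [(PySem.Dict.contains_iff_mem_keys d k).mpr hk]
      simp)
  rw [hfc]
  have hnf : (d.keys.filter (fun key => decide (h < key))).Nodup := hdk.filter _
  have hmembr : ∀ a, a ∈ d.keys.filter (fun key => decide (h < key)) ↔ a ∈ cnt.keys := by
    intro a
    constructor
    · intro ha
      have hmem := List.mem_filter.mp ha
      have hha : h < a := by simpa using hmem.2
      by_contra hc
      have h1 : cnt.get? a = none := (PySem.Dict.get?_eq_none_iff_not_mem_keys cnt a).mpr hc
      have h2 : d.get? a = none := by rw [hagree a hha]; exact h1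
      exact ((PySem.Dict.get?_eq_none_iff_not_mem_keys d a).mp h2) hmem.1
    · intro ha
      have hha := hlow a ha
      have h1 : cnt.get? a ≠ none := fun he =>
        ((PySem.Dict.get?_eq_none_iff_not_mem_keys cnt a).mp he) ha
      have h2 : d.get? a ≠ none := by rw [hagree a hha]; exact h1
      have h3 : a ∈ d.keys := by
        by_contra hc
        exact h2 ((PySem.Dict.get?_eq_none_iff_not_mem_keys d a).mpr hc)
      exact List.mem_filter.mpr ⟨h3, by simpa using hha⟩
  have hpk : (d.keys.filter (fun key => decide (h < key))).Perm cnt.keys :=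
    (List.perm_ext_iff_of_nodup hnf hck).mpr hmembr
  have hmap : (d.keys.filter (fun key => decide (h < key))).map (fun k => d.getD k 0)
      = (d.keys.filter (fun key => decide (h < key))).map (fun k => cnt.getD k 0) :=
    List.map_congr_left (fun k hk => by
      have hha : h < k := by simpa using (List.mem_filter.mp hk).2
      rw [PySem.Dict.getD_eq_get?_getD, PySem.Dict.getD_eq_get?_getD, hagree k hha])
  rw [hmap, (hpk.map (fun k => cnt.getD k 0)).sum_eq]
  rfl

-- the coupling invariant between A's state (r, d) and B's state (res, h, size, cnt)
def StInv (r : List Int) (d : PySem.Dict Int Int)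
    (res : List Int) (h size : Int) (cnt : PySem.Dict Int Int) : Prop :=
  r = 0 :: res ∧
  r.getLast? = some h ∧
  0 ≤ h ∧ size ≤ h ∧
  d.keys.Nodup ∧ cnt.keys.Nodup ∧
  (∀ k, h < k → d.get? k = cnt.get? k) ∧
  (∀ k ∈ cnt.keys, h < k) ∧
  (∀ k, 0 ≤ cnt.getD k 0) ∧
  size = sumVals cnt

-- the step outcome when the h-index increases
theorem inc_case (d1 cnt1 : PySem.Dict Int Int) (h : Int) (res : List Int)
    (hh0 : 0 ≤ h)
    (hdk1 : d1.keys.Nodup) (hck1 : cnt1.keys.Nodup)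
    (hagree1 : ∀ k, h < k → d1.get? k = cnt1.get? k)
    (hlow1 : ∀ k ∈ cnt1.keys, h < k)
    (hpos1 : ∀ k, 0 ≤ cnt1.getD k 0)
    (hsum1 : h + 1 = sumVals cnt1) :
    StInv ((0 :: res) ++ [h + 1]) (if d1.contains h then d1.erase h else d1)
        (res ++ [h + 1]) (h + 1) (h + 1 - cnt1.getD (h + 1) 0) (cnt1.erase (h + 1)) := by
  refine ⟨by simp, List.getLast?_concat, by omega, ?_, ?_,
          nodup_keys_erase cnt1 (h + 1) hck1, ?_, ?_, ?_, ?_⟩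
  · have := hpos1 (h + 1); omega
  · cases hc : d1.contains h
    · simpa [hc] using hdk1
    · simpa [hc] using nodup_keys_erase d1 h hdk1
  · intro k hk
    have hk1 : h < k := by omega
    have hkh : k ≠ h := by omega
    have hkh1 : k ≠ h + 1 := by omega
    have hd2 : (if d1.contains h then d1.erase h else d1).get? k = d1.get? k := by
      cases hc : d1.contains h
      · simp [hc]
      · simp [hc, get?_erase_of_ne d1 h k hkh]
    rw [hd2, hagree1 k hk1, get?_erase_of_ne cnt1 (h + 1) k hkh1]
  · intro k hk
    rw [keys_erase] at hk
    have hmem := List.mem_filter.mp hk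
    have h1 := hlow1 k hmem.1
    have h2 : k ≠ h + 1 := by simpa using hmem.2
    omega
  · intro k
    by_cases hkk : k = h + 1
    · subst hkk
      rw [PySem.Dict.getD_eq_get?_getD, get?_erase_self]
      norm_num
    · rw [PySem.Dict.getD_eq_get?_getD, get?_erase_of_ne cnt1 (h + 1) k hkk,
          ← PySem.Dict.getD_eq_get?_getD]
      exact hpos1 k
  · rw [sumVals_erase cnt1 (h + 1) hck1, ← hsum1]

-- the step outcome when the h-index stays
theorem noinc_case (d1 cnt1 : PySem.Dict Int Int) (h size1 : Int) (res : List Int)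
    (hh0 : 0 ≤ h)
    (hdk1 : d1.keys.Nodup) (hck1 : cnt1.keys.Nodup)
    (hagree1 : ∀ k, h < k → d1.get? k = cnt1.get? k)
    (hlow1 : ∀ k ∈ cnt1.keys, h < k)
    (hpos1 : ∀ k, 0 ≤ cnt1.getD k 0)
    (hsum1 : size1 = sumVals cnt1)
    (hle : size1 ≤ h) :
    StInv ((0 :: res) ++ [h]) d1 (res ++ [h]) h size1 cnt1 :=
  ⟨by simp, List.getLast?_concat, hh0, hle, hdk1, hck1, hagree1, hlow1, hpos1, hsum1⟩

theorem step_preserves (r : List Int) (d : PySem.Dict Int Int)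
    (res : List Int) (h size : Int) (cnt : PySem.Dict Int Int) (x : Int)
    (hInv : StInv r d res h size cnt) :
    StInv (aStep (r, d) x).1 (aStep (r, d) x).2
        (bStep (res, h, size, cnt) x).1 (bStep (res, h, size, cnt) x).2.1
        (bStep (res, h, size, cnt) x).2.2.1 (bStep (res, h, size, cnt) x).2.2.2 := by
  obtain ⟨hr, hlast, hh0, hsh, hdk, hck, hagree, hlow, hpos, hsum⟩ := hInv
  have hrne : r ≠ [] := by rw [hr]; exact List.cons_ne_nil _ _
  have hlastv : (PySem.List.pyGet? r (-1)).getD 0 = h := by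
    rw [pyGet_neg_one r hrne, hlast]
    rfl
  have hd1 : (if d.contains x then d.insert x (d.getD x 0 + 1) else d.insert x 1)
      = d.insert x (d.getD x 0 + 1) := by
    cases hc : d.contains x
    · simp [hc, PySem.Dict.getD_of_not_contains d 0 hc]
    · simp [hc]
  have hdk1 : (d.insert x (d.getD x 0 + 1)).keys.Nodup :=
    PySem.Dict.nodup_keys_insert d x _ hdk
  simp only [aStep, bStep]
  rw [hlastv, hd1]
  by_cases hx : x > h
  · -- the new citation is pushed
    simp only [if_pos hx]
    have hck1 : (cnt.insert x (cnt.getD x 0 + 1)).keys.Nodup :=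
      PySem.Dict.nodup_keys_insert cnt x _ hck
    have hagree1 : ∀ k, h < k →
        (d.insert x (d.getD x 0 + 1)).get? k = (cnt.insert x (cnt.getD x 0 + 1)).get? k := by
      intro k hk
      rw [PySem.Dict.get?_insert, PySem.Dict.get?_insert]
      by_cases hkx : k = x
      · rw [if_pos hkx, if_pos hkx, PySem.Dict.getD_eq_get?_getD,
            PySem.Dict.getD_eq_get?_getD, hagree x hx]
      · rw [if_neg hkx, if_neg hkx]
        exact hagree k hk
    have hlow1 : ∀ k ∈ (cnt.insert x (cnt.getD x 0 + 1)).keys, h < k := by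
      intro k hk
      rcases (PySem.Dict.mem_keys_insert _ _ _ _).mp hk with rfl | hm
      · exact hx
      · exact hlow k hm
    have hpos1 : ∀ k, 0 ≤ (cnt.insert x (cnt.getD x 0 + 1)).getD k 0 := by
      intro k
      rw [PySem.Dict.getD_insert]
      by_cases hkx : k = x
      · rw [if_pos hkx]; have := hpos x; omega
      · rw [if_neg hkx]; exact hpos k
    have hsum1 : size + 1 = sumVals (cnt.insert x (cnt.getD x 0 + 1)) := by
      rw [sumVals_insert_succ cnt x hck, ← hsum]
    have hcounter := counter_eq (d.insert x (d.getD x 0 + 1))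
        (cnt.insert x (cnt.getD x 0 + 1)) h hdk1 hck1 hagree1 hlow1
    rw [hcounter, ← hsum1]
    by_cases hgt : size + 1 > h
    · have hs1 : size + 1 = h + 1 := by omega
      rw [hs1]
      simp only [if_pos (show h + 1 > h by omega), hr]
      exact inc_case (d.insert x (d.getD x 0 + 1)) (cnt.insert x (cnt.getD x 0 + 1)) h res
        hh0 hdk1 hck1 hagree1 hlow1 hpos1 (hs1 ▸ hsum1)
    · simp only [if_neg hgt, hr]
      exact noinc_case (d.insert x (d.getD x 0 + 1)) (cnt.insert x (cnt.getD x 0 + 1)) h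
        (size + 1) res hh0 hdk1 hck1 hagree1 hlow1 hpos1 hsum1 (by omega)
  · -- the new citation is ignored by B's counter structure
    simp only [if_neg hx]
    have hagree1 : ∀ k, h < k → (d.insert x (d.getD x 0 + 1)).get? k = cnt.get? k := by
      intro k hk
      have hkx : k ≠ x := fun he => hx (he ▸ hk)
      rw [PySem.Dict.get?_insert, if_neg hkx]
      exact hagree k hk
    have hcounter := counter_eq (d.insert x (d.getD x 0 + 1)) cnt h hdk1 hck hagree1 hlow
    rw [hcounter, ← hsum]
    have hgt : ¬ size > h := by omega
    simp only [if_neg hgt, hr]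
    exact noinc_case (d.insert x (d.getD x 0 + 1)) cnt h size res
      hh0 hdk1 hck hagree1 hlow hpos hsum hsh

theorem fold_preserves (l : List Int) (r : List Int) (d : PySem.Dict Int Int)
    (res : List Int) (h size : Int) (cnt : PySem.Dict Int Int)
    (hInv : StInv r d res h size cnt) :
    StInv (l.foldl aStep (r, d)).1 (l.foldl aStep (r, d)).2
        (l.foldl bStep (res, h, size, cnt)).1 (l.foldl bStep (res, h, size, cnt)).2.1
        (l.foldl bStep (res, h, size, cnt)).2.2.1 (l.foldl bStep (res, h, size, cnt)).2.2.2 := by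
  induction l generalizing r d res h size cnt with
  | nil => exact hInv
  | cons x t ih =>
      have h1 := step_preserves r d res h size cnt x hInv
      simpa using ih _ _ _ _ _ _ h1

theorem StInv_init : StInv [0] (PySem.Dict.ofList [(0, 1)]) [] 0 0 PySem.Dict.empty := by
  refine ⟨rfl, by decide, le_refl 0, le_refl 0, by decide, by decide, ?_, ?_, ?_, by decide⟩
  · intro k hk
    have h0k : ¬ ((0 : Int) = k) := by omega
    rw [show PySem.Dict.ofList [((0 : Int), (1 : Int))] = PySem.Dict.mk [(0, 1)] from rfl,
        PySem.Dict.get?_mk_cons]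
    simp [h0k, PySem.Dict.empty]
  · intro k hk
    simp [PySem.Dict.keys, PySem.Dict.empty] at hk
  · intro k
    rw [PySem.Dict.getD_empty]

-- ===== VERDICT (by name: the statement is the Claim_ definition above) =====
theorem get_h_index_spec : Claim_equal_get_h_index := by
  intro c _
  unfold Spec_get_h_index get_h_index get_h_index_alt
  rw [show (fun (st : List Int × PySem.Dict Int Int) (i : Int) => aStep st (PySem.List.pyGetD c i 0))
        = (fun st i => (fun acc j => aStep acc (PySem.List.pyGetD c j 0)) st i) from rfl]
  rw [PySem.List.foldl_pyRange_pyGetD c 0 aStep ([0], PySem.Dict.ofList [(0, 1)]) (le_refl 0)]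
  have hfold := fold_preserves c [0] (PySem.Dict.ofList [(0, 1)]) [] 0 0 PySem.Dict.empty StInv_init
  have h1 := hfold.1
  simp only [Int.toNat_zero, List.drop_zero] at h1 ⊢
  rw [h1, PySem.List.slice_from _ (by norm_num : (0:Int) ≤ 1)]
  simp
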